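-- pv_equiv track=rewrite | github.com/naiveai/adventofcode | python/2018/20/common.py | parse_rooms_regex
-- ===== SOURCE A (Python) =====
-- DIRECTIONS = {
--     'N': (0, 1),
--     'E': (1, 0),
--     'S': (0, -1),
--     'W': (-1, 0),
-- }
--
-- def parse_rooms_regex(rooms_regex):
--     grid = {(0, 0): 0}
--     dist = x = y = 0
--     stack = []
--
--     for char in rooms_regex:
--         if char == '(':
--             stack.append((dist, x, y))
--         elif char == ')':
--             dist, x, y = stack.pop()
--         elif char == '|':
--             dist, x, y = stack[-1]
--         else:
--             dx, dy = DIRECTIONS[char]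
--             x += dx
--             y += dy
--
--             dist += 1
--             if (x, y) not in grid or dist < grid[(x, y)]:
--                 grid[(x, y)] = dist
--
--     return grid
-- ===== SOURCE B (Python) =====
-- DIRECTIONS = {
--     'N': (0, 1),
--     'E': (1, 0),
--     'S': (0, -1),
--     'W': (-1, 0),
-- }
--
-- def parse_rooms_regex(rooms_regex):
--     grid = {(0, 0): 0}
--     n = len(rooms_regex)
--
--     def walk(i, dist, x, y):
--         # Process characters until ')' / '|' / end of string; return the stop index.
--         while i < n:
--             char = rooms_regex[i]
--             if char == ')' or char == '|':
--                 return i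
--             if char == '(':
--                 j = i + 1
--                 while True:
--                     j = walk(j, dist, x, y)   # each branch restarts from the group start
--                     if j >= n:
--                         break
--                     if rooms_regex[j] == ')':
--                         j += 1
--                         break
--                     j += 1                    # skip the '|'
--                 i = j                          # continue after the group, from its start state
--             else:
--                 dx, dy = DIRECTIONS[char]
--                 x += dx
--                 y += dy
--                 dist += 1
--                 if (x, y) not in grid or dist < grid[(x, y)]:
--                     grid[(x, y)] = dist
--                 i += 1
--         return n
--
--     walk(0, 0, 0, 0)
--     return grid
-- ===== Notes on version B (the rewrite author's own statement) =====
-- stated objective: alternative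
-- what changed: B replaces A's single linear scan with an explicit (dist,x,y) stack by a recursive-descent parser that walks the regex with a shared position index, recursing on '(' to run each '|'-separated branch from the group's start state, so the call stack replaces the explicit stack.
import Mathlib
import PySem

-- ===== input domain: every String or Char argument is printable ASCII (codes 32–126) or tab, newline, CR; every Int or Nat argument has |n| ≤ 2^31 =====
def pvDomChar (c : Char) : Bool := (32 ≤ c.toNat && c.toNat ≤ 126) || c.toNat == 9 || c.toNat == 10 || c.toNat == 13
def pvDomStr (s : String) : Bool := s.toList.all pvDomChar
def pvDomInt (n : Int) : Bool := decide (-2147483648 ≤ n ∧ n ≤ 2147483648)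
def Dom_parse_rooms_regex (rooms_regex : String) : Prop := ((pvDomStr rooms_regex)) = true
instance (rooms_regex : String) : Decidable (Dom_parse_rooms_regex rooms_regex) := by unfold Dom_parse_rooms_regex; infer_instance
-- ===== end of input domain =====

-- B is an 'alternative' re-implementation: a recursive-descent parser over the regex replaces
-- A's linear scan with an explicit (dist,x,y) stack; same return value wherever A returns.

-- ===== PORT A =====
def pvDirs : PySem.Dict Char (Int × Int) :=
  PySem.Dict.ofList [('N', ((0 : Int), (1 : Int))), ('E', (1, 0)), ('S', (0, -1)), ('W', (-1, 0))]

-- the shared grid update: grid[(x,y)] = dist if absent or smaller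
def pvGridUpd (g : PySem.Dict (Int × Int) Int) (xy : Int × Int) (d : Int) :
    PySem.Dict (Int × Int) Int :=
  match g.get? xy with
  | none => g.insert xy d
  | some v => if d < v then g.insert xy d else g

-- one step of A's for-loop; `none` = the Python raised (pop/peek of empty stack, KeyError)
def pvStepA
    (st : Option (PySem.Dict (Int × Int) Int × Int × Int × Int × List (Int × Int × Int)))
    (c : Char) :
    Option (PySem.Dict (Int × Int) Int × Int × Int × Int × List (Int × Int × Int)) :=
  match st with
  | none => none
  | some (g, d, x, y, s) =>
    if c = '(' then some (g, d, x, y, (d, x, y) :: s)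
    else if c = ')' then
      match s with
      | [] => none
      | (d0, x0, y0) :: s' => some (g, d0, x0, y0, s')
    else if c = '|' then
      match s with
      | [] => none
      | (d0, x0, y0) :: _ => some (g, d0, x0, y0, s)
    else
      match PySem.Dict.get? pvDirs c with
      | none => none
      | some (dx, dy) => some (pvGridUpd g (x + dx, y + dy) (d + 1), d + 1, x + dx, y + dy, s)

def parse_rooms_regex (rooms_regex : String) : List (Int × Int × Int) :=
  match rooms_regex.toList.foldl pvStepA
      (some (PySem.Dict.ofList [(((0 : Int), (0 : Int)), (0 : Int))], 0, 0, 0, [])) with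
  | none => []
  | some (g, _, _, _, _) => g.items.map (fun p => (p.1.1, p.1.2, p.2))

-- ===== PORT B =====
-- recursive descent; the Nat argument is pure fuel for termination (2*len+1 is always enough)
mutual
def pvWalk : Nat → PySem.Dict (Int × Int) Int → Int → Int → Int → List Char →
    Option (PySem.Dict (Int × Int) Int × List Char)
  | 0, _, _, _, _, _ => none
  | Nat.succ f, g, d, x, y, cs =>
    match cs with
    | [] => some (g, [])
    | c :: rest =>
      if c = ')' ∨ c = '|' then some (g, c :: rest)
      else if c = '(' then
        match pvBranches f g d x y rest with
        | none => none
        | some (g', rest') => pvWalk f g' d x y rest'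
      else
        match PySem.Dict.get? pvDirs c with
        | none => none
        | some (dx, dy) => pvWalk f (pvGridUpd g (x + dx, y + dy) (d + 1)) (d + 1) (x + dx) (y + dy) rest

def pvBranches : Nat → PySem.Dict (Int × Int) Int → Int → Int → Int → List Char →
    Option (PySem.Dict (Int × Int) Int × List Char)
  | 0, _, _, _, _, _ => none
  | Nat.succ f, g, d, x, y, cs =>
    match pvWalk f g d x y cs with
    | none => none
    | some (g', rest) =>
      match rest with
      | [] => some (g', [])
      | c :: r => if c = ')' then some (g', r) else pvBranches f g' d x y r
end

def parse_rooms_regex_alt (rooms_regex : String) : List (Int × Int × Int) :=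
  match pvWalk (2 * rooms_regex.toList.length + 1)
      (PySem.Dict.ofList [(((0 : Int), (0 : Int)), (0 : Int))]) 0 0 0 rooms_regex.toList with
  | none => []
  | some (g, _) => g.items.map (fun p => (p.1.1, p.1.2, p.2))

-- ===== PRECONDITION & SPEC =====
def pvAllowedChar (c : Char) : Bool :=
  c == 'N' || c == 'E' || c == 'S' || c == 'W' || c == '(' || c == ')' || c == '|' 

-- Pre_ excludes exactly the inputs where A raises: an unknown character (KeyError) or a ')' / '|'
-- reached with an empty stack (IndexError).
def Pre_parse_rooms_regex (rooms_regex : String) : Prop :=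
  rooms_regex.toList.all pvAllowedChar = true ∧
  ∀ i < rooms_regex.toList.length,
    (rooms_regex.toList.getD i ' ' = ')' ∨ rooms_regex.toList.getD i ' ' = '|') →
    (rooms_regex.toList.take i).count ')' < (rooms_regex.toList.take i).count '('

instance (rooms_regex : String) : Decidable (Pre_parse_rooms_regex rooms_regex) := by
  unfold Pre_parse_rooms_regex; infer_instance

def pvWitness_parse_rooms_regex : String := "NN(E|W)S"

def Spec_parse_rooms_regex (rooms_regex : String) (out : List (Int × Int × Int)) : Prop :=
  out = parse_rooms_regex_alt rooms_regex
instance (rooms_regex : String) (out : List (Int × Int × Int)) :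
    Decidable (Spec_parse_rooms_regex rooms_regex out) := by
  unfold Spec_parse_rooms_regex; infer_instance

-- ===== CLAIM (what is proved, stated in full; the proofs are below) =====
def Claim_equal_parse_rooms_regex : Prop :=
  ∀ (rooms_regex : String), Dom_parse_rooms_regex rooms_regex →
    Pre_parse_rooms_regex rooms_regex →
    Spec_parse_rooms_regex rooms_regex (parse_rooms_regex rooms_regex)

-- ===== LEMMAS AND PROOFS =====


-- A's run from a given state, projected to the final grid (`none` = the Python raised)
def pvRunA (cs : List Char) (g : PySem.Dict (Int × Int) Int) (d x y : Int)
    (s : List (Int × Int × Int)) : Option (PySem.Dict (Int × Int) Int) :=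
  match cs.foldl pvStepA (some (g, d, x, y, s)) with
  | none => none
  | some (g', _, _, _, _) => some g'

-- how A continues once B's walk has stopped (at the end, or at a ')' or '|')
def pvCont (o : Option (PySem.Dict (Int × Int) Int × List Char))
    (s : List (Int × Int × Int)) : Option (PySem.Dict (Int × Int) Int) :=
  match o with
  | none => none
  | some (g, []) => some g
  | some (g, c :: r) =>
    if c = ')' then
      match s with
      | [] => none
      | (d0, x0, y0) :: s' => pvRunA r g d0 x0 y0 s'
    else
      match s with
      | [] => none
      | (d0, x0, y0) :: _ => pvRunA r g d0 x0 y0 s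

lemma pvFoldNone (cs : List Char) : cs.foldl pvStepA none = none := by
  induction cs with
  | nil => rfl
  | cons c rest ih => simpa [List.foldl, pvStepA] using ih

lemma pvRunA_cons (c : Char) (cs : List Char) (g : PySem.Dict (Int × Int) Int) (d x y : Int)
    (s : List (Int × Int × Int)) :
    pvRunA (c :: cs) g d x y s =
      match pvStepA (some (g, d, x, y, s)) c with
      | none => none
      | some (g', d', x', y', s') => pvRunA cs g' d' x' y' s' := by
  cases h : pvStepA (some (g, d, x, y, s)) c with
  | none => simp [pvRunA, List.foldl, h, pvFoldNone]
  | some st =>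
    obtain ⟨g', d', x', y', s'⟩ := st
    simp [pvRunA, List.foldl, h]

lemma pvRunA_cons_some {c : Char} {cs : List Char} {g g' : PySem.Dict (Int × Int) Int}
    {d x y d' x' y' : Int} {s s' : List (Int × Int × Int)}
    (h : pvStepA (some (g, d, x, y, s)) c = some (g', d', x', y', s')) :
    pvRunA (c :: cs) g d x y s = pvRunA cs g' d' x' y' s' := by
  rw [pvRunA_cons, h]

lemma pvRunA_cons_none {c : Char} {cs : List Char} {g : PySem.Dict (Int × Int) Int}
    {d x y : Int} {s : List (Int × Int × Int)}
    (h : pvStepA (some (g, d, x, y, s)) c = none) :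
    pvRunA (c :: cs) g d x y s = none := by
  rw [pvRunA_cons, h]

-- length of what pvWalk / pvBranches leave unconsumed
lemma pvLen : ∀ f : Nat,
    (∀ g d x y cs g' r, pvWalk f g d x y cs = some (g', r) → r.length ≤ cs.length) ∧
    (∀ g d x y cs g' r, pvBranches f g d x y cs = some (g', r) → r.length ≤ cs.length) := by
  intro f
  induction f with
  | zero =>
    constructor <;> (intro g d x y cs g' r h; simp [pvWalk, pvBranches] at h)
  | succ f ih =>
    obtain ⟨ihw, ihb⟩ := ih
    constructor
    · intro g d x y cs g' r h
      cases cs with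
      | nil =>
        simp [pvWalk] at h
        simp [← h.2]
      | cons c rest =>
        by_cases h1 : c = ')' ∨ c = '|'
        · simp only [pvWalk, if_pos h1] at h
          obtain ⟨rfl, rfl⟩ := by simpa using h
          simp
        · by_cases h2 : c = '('
          · cases hb : pvBranches f g d x y rest with
            | none => simp [pvWalk, if_neg h1, h2, hb] at h
            | some p =>
              obtain ⟨g1, rest1⟩ := p
              simp only [pvWalk, if_neg h1, h2, if_pos rfl, hb] at h
              have e1 := ihb g d x y rest g1 rest1 hb
              have e2 := ihw g1 d x y rest1 g' r h
              simp only [List.length_cons]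
              omega
          · cases hd : PySem.Dict.get? pvDirs c with
            | none => simp [pvWalk, if_neg h1, h2, hd] at h
            | some p =>
              obtain ⟨dx, dy⟩ := p
              simp only [pvWalk, if_neg h1, if_neg h2, hd] at h
              have := ihw _ _ _ _ _ _ _ h
              simp only [List.length_cons]
              omega
    · intro g d x y cs g' r h
      cases hw : pvWalk f g d x y cs with
      | none => simp [pvBranches, hw] at h
      | some p =>
        obtain ⟨g1, rest⟩ := p
        have e1 := ihw g d x y cs g1 rest hw
        cases rest with
        | nil =>
          simp only [pvBranches, hw] at h
          obtain ⟨rfl, rfl⟩ := by simpa using h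
          simp
        | cons c r0 =>
          by_cases hc : c = ')'
          · simp only [pvBranches, hw, if_pos hc] at h
            obtain ⟨rfl, rfl⟩ := by simpa using h
            simp only [List.length_cons] at e1
            omega
          · simp only [pvBranches, hw, if_neg hc] at h
            have := ihb g1 d x y r0 g' r h
            simp only [List.length_cons] at e1
            omega

-- main simulation: A's run equals B's walk followed by A's continuation
lemma pvMain : ∀ n : Nat,
    (∀ cs : List Char, cs.length = n → ∀ f g d x y s, 2 * cs.length + 1 ≤ f →
      pvRunA cs g d x y s = pvCont (pvWalk f g d x y cs) s) ∧
    (∀ cs : List Char, cs.length = n → ∀ f g d0 x0 y0 s, 2 * cs.length + 2 ≤ f →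
      pvRunA cs g d0 x0 y0 ((d0, x0, y0) :: s) =
        match pvBranches f g d0 x0 y0 cs with
        | none => none
        | some (g', rest) => pvRunA rest g' d0 x0 y0 s) := by
  intro n
  induction n using Nat.strong_induction_on with
  | _ n ih =>
    have hP : ∀ cs : List Char, cs.length = n → ∀ f g d x y s, 2 * cs.length + 1 ≤ f →
        pvRunA cs g d x y s = pvCont (pvWalk f g d x y cs) s := by
      intro cs hn f g d x y s hf
      cases f with
      | zero => omega
      | succ f =>
        cases cs with
        | nil => simp [pvRunA, pvWalk, pvCont]
        | cons c rest =>
          simp only [List.length_cons] at hn hf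
          by_cases h1 : c = ')' ∨ c = '|'
          · rcases h1 with rfl | rfl
            · cases s with
              | nil =>
                have hstep : pvStepA (some (g, d, x, y, ([] : List (Int × Int × Int)))) ')' = none := by
                  simp [pvStepA]
                rw [pvRunA_cons_none hstep]; simp [pvWalk, pvCont]
              | cons t s' =>
                obtain ⟨d0, x0, y0⟩ := t
                have hstep : pvStepA (some (g, d, x, y, (d0, x0, y0) :: s')) ')' =
                    some (g, d0, x0, y0, s') := by simp [pvStepA]
                rw [pvRunA_cons_some hstep]
                simp [pvWalk, pvCont]
            · cases s with
              | nil =>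
                have hstep : pvStepA (some (g, d, x, y, ([] : List (Int × Int × Int)))) '|' = none := by
                  simp [pvStepA]
                rw [pvRunA_cons_none hstep]; simp [pvWalk, pvCont]
              | cons t s' =>
                obtain ⟨d0, x0, y0⟩ := t
                have hstep : pvStepA (some (g, d, x, y, (d0, x0, y0) :: s')) '|' =
                    some (g, d0, x0, y0, (d0, x0, y0) :: s') := by simp [pvStepA]
                rw [pvRunA_cons_some hstep]
                simp [pvWalk, pvCont]
          · have h1a : ¬c = ')' := fun h => h1 (Or.inl h)
            have h1b : ¬c = '|' := fun h => h1 (Or.inr h)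
            by_cases h2 : c = '('
            · subst h2
              have hstep : pvStepA (some (g, d, x, y, s)) '(' =
                  some (g, d, x, y, (d, x, y) :: s) := by simp [pvStepA]
              rw [pvRunA_cons_some hstep]
              have hQ := (ih rest.length (by omega)).2 rest rfl f g d x y s (by omega)
              rw [hQ]
              cases hb : pvBranches f g d x y rest with
              | none => simp [pvWalk, hb, pvCont]
              | some p =>
                obtain ⟨g1, rest1⟩ := p
                have hlen := (pvLen f).2 _ _ _ _ _ _ _ hb
                have hP1 := (ih rest1.length (by omega)).1 rest1 rfl f g1 d x y s (by omega)
                show pvRunA rest1 g1 d x y s = pvCont (pvWalk (f + 1) g d x y ('(' :: rest)) s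
                rw [hP1]
                simp [pvWalk, hb]
            · cases hd : PySem.Dict.get? pvDirs c with
              | none =>
                have hstep : pvStepA (some (g, d, x, y, s)) c = none := by
                  simp [pvStepA, h1a, h1b, h2, hd]
                rw [pvRunA_cons_none hstep]
                simp [pvStepA, h1a, h1b, h1, h2, hd, pvWalk, pvCont]
              | some p =>
                obtain ⟨dx, dy⟩ := p
                have hstep : pvStepA (some (g, d, x, y, s)) c =
                    some (pvGridUpd g (x + dx, y + dy) (d + 1), d + 1, x + dx, y + dy, s) := by
                  simp [pvStepA, h1a, h1b, h2, hd]
                rw [pvRunA_cons_some hstep]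
                have hP1 := (ih rest.length (by omega)).1 rest rfl f
                  (pvGridUpd g (x + dx, y + dy) (d + 1)) (d + 1) (x + dx) (y + dy) s (by omega)
                rw [hP1]
                simp only [pvWalk, if_neg h1, if_neg h2, hd]
    have hQ : ∀ cs : List Char, cs.length = n → ∀ f g d0 x0 y0 s, 2 * cs.length + 2 ≤ f →
        pvRunA cs g d0 x0 y0 ((d0, x0, y0) :: s) =
          match pvBranches f g d0 x0 y0 cs with
          | none => none
          | some (g', rest) => pvRunA rest g' d0 x0 y0 s := by
      intro cs hn f g d0 x0 y0 s hf
      cases f with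
      | zero => omega
      | succ f =>
        rw [hP cs hn f g d0 x0 y0 ((d0, x0, y0) :: s) (by omega)]
        cases hw : pvWalk f g d0 x0 y0 cs with
        | none => simp [pvBranches, hw, pvCont]
        | some p =>
          obtain ⟨g1, rest⟩ := p
          have hlen := (pvLen f).1 _ _ _ _ _ _ _ hw
          cases rest with
          | nil => simp [pvBranches, hw, pvCont, pvRunA]
          | cons c r =>
            by_cases hc : c = ')'
            · subst hc
              simp [pvBranches, hw, pvCont]
            · simp only [pvBranches, hw, if_neg hc, pvCont]
              have hQ1 := (ih r.length
                  (by simp only [List.length_cons] at hlen; omega)).2 r rfl f g1 d0 x0 y0 s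
                  (by simp only [List.length_cons] at hlen; omega)
              exact hQ1
    exact ⟨hP, hQ⟩

-- under the balance condition A never raises
lemma pvNoErr : ∀ (cs : List Char) (g : PySem.Dict (Int × Int) Int) (d x y : Int)
    (s : List (Int × Int × Int)),
    cs.all pvAllowedChar = true →
    (∀ i < cs.length, (cs.getD i ' ' = ')' ∨ cs.getD i ' ' = '|') →
      (cs.take i).count ')' < (cs.take i).count '(' + s.length) →
    ∃ g', pvRunA cs g d x y s = some g' := by
  intro cs
  induction cs with
  | nil => intro g d x y s _ _; exact ⟨g, rfl⟩
  | cons c rest ih =>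
    intro g d x y s hc hb
    have hcrest : rest.all pvAllowedChar = true := by
      simp only [List.all_cons, Bool.and_eq_true] at hc
      exact hc.2
    by_cases h2 : c = '('
    · subst h2
      have hstep : pvStepA (some (g, d, x, y, s)) '(' =
          some (g, d, x, y, (d, x, y) :: s) := by simp [pvStepA]
      rw [pvRunA_cons_some hstep]
      apply ih _ _ _ _ _ hcrest
      intro i hi hch
      have := hb (i + 1) (by simp; omega) (by simpa using hch)
      simp only [List.take_succ_cons, List.count_cons, List.length_cons] at this ⊢
      simp at this
      omega
    · by_cases h3 : c = ')'
      · subst h3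
        have h0 := hb 0 (by simp) (by simp)
        simp at h0
        cases s with
        | nil => simp at h0
        | cons t s' =>
          obtain ⟨d0, x0, y0⟩ := t
          have hstep : pvStepA (some (g, d, x, y, (d0, x0, y0) :: s')) ')' =
              some (g, d0, x0, y0, s') := by simp [pvStepA]
          rw [pvRunA_cons_some hstep]
          apply ih _ _ _ _ _ hcrest
          intro i hi hch
          have := hb (i + 1) (by simp; omega) (by simpa using hch)
          simp only [List.take_succ_cons, List.count_cons, List.length_cons] at this ⊢
          simp at this
          omega
      · by_cases h4 : c = '|'
        · subst h4
          have h0 := hb 0 (by simp) (by simp)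
          simp at h0
          cases s with
          | nil => simp at h0
          | cons t s' =>
            obtain ⟨d0, x0, y0⟩ := t
            have hstep : pvStepA (some (g, d, x, y, (d0, x0, y0) :: s')) '|' =
                some (g, d0, x0, y0, (d0, x0, y0) :: s') := by simp [pvStepA]
            rw [pvRunA_cons_some hstep]
            apply ih _ _ _ _ _ hcrest
            intro i hi hch
            have := hb (i + 1) (by simp; omega) (by simpa using hch)
            simp only [List.take_succ_cons, List.count_cons, List.length_cons] at this ⊢
            simp at this
            omega
        · have hcm : pvAllowedChar c = true := by
            simp only [List.all_cons, Bool.and_eq_true] at hc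
            exact hc.1
          have hd : ∃ dx dy, PySem.Dict.get? pvDirs c = some (dx, dy) := by
            simp only [pvAllowedChar, Bool.or_eq_true, beq_iff_eq] at hcm
            rcases hcm with (((((rfl | rfl) | rfl) | rfl) | rfl) | rfl) | rfl
            · exact ⟨0, 1, by decide⟩
            · exact ⟨1, 0, by decide⟩
            · exact ⟨0, -1, by decide⟩
            · exact ⟨-1, 0, by decide⟩
            · exact absurd rfl h2
            · exact absurd rfl h3
            · exact absurd rfl h4
          obtain ⟨dx, dy, hd⟩ := hd
          have hstep : pvStepA (some (g, d, x, y, s)) c =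
              some (pvGridUpd g (x + dx, y + dy) (d + 1), d + 1, x + dx, y + dy, s) := by
            simp [pvStepA, h2, h3, h4, hd]
          rw [pvRunA_cons_some hstep]
          apply ih _ _ _ _ _ hcrest
          intro i hi hch
          have := hb (i + 1) (by simp; omega) (by simpa using hch)
          simp only [List.take_succ_cons, List.count_cons, List.length_cons] at this ⊢
          simp [h2, h3] at this
          omega

-- ===== VERDICT (by name: the statement is the Claim_ definition above) =====
theorem parse_rooms_regex_spec : Claim_equal_parse_rooms_regex := by
  intro s _ hpre
  unfold Spec_parse_rooms_regex
  obtain ⟨hc, hb⟩ := hpre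
  obtain ⟨G, hG⟩ := pvNoErr s.toList
    (PySem.Dict.ofList [(((0 : Int), (0 : Int)), (0 : Int))]) 0 0 0 [] hc
    (by intro i hi hch; have := hb i hi hch; simpa using this)
  have hm := (pvMain s.toList.length).1 s.toList rfl (2 * s.toList.length + 1)
    (PySem.Dict.ofList [(((0 : Int), (0 : Int)), (0 : Int))]) 0 0 0 [] (le_refl _)
  rw [hG] at hm
  cases hw : pvWalk (2 * s.toList.length + 1)
      (PySem.Dict.ofList [(((0 : Int), (0 : Int)), (0 : Int))]) 0 0 0 s.toList with
  | none => rw [hw] at hm; simp [pvCont] at hm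
  | some p =>
    obtain ⟨g1, rest⟩ := p
    rw [hw] at hm
    cases rest with
    | nil =>
      simp only [pvCont, Option.some.injEq] at hm
      subst hm
      unfold parse_rooms_regex parse_rooms_regex_alt
      rw [hw]
      unfold pvRunA at hG
      cases hf : s.toList.foldl pvStepA
          (some (PySem.Dict.ofList [(((0 : Int), (0 : Int)), (0 : Int))], 0, 0, 0, [])) with
      | none => rw [hf] at hG; simp at hG
      | some st =>
        obtain ⟨g2, d2, x2, y2, s2⟩ := st
        rw [hf] at hG
        simp only [Option.some.injEq] at hG
        rw [hG]
    | cons c r =>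
      by_cases hcp : c = ')'
      · simp [pvCont, hcp] at hm
      · simp [pvCont, hcp] at hm
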